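-- pv_equiv track=rewrite | github.com/ragardner/tksheet | tksheet/functions.py | move_elements_by_mapping
-- ===== SOURCE A (Python) =====
-- from typing import Any, Literal
--
-- def move_elements_by_mapping(
--     seq: list[Any],
--     new_idxs: dict[int, int],
--     old_idxs: dict[int, int] | None = None,
-- ) -> list[Any]:
--     # move elements of a list around
--     # displacing other elements based on mapping
--     # new_idxs = {old index: new index, ...}
--     # old_idxs = {new index: old index, ...}
--     if old_idxs is None:
--         old_idxs = dict(zip(new_idxs.values(), new_idxs))
--     remaining_values = (e for i, e in enumerate(seq) if i not in new_idxs)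
--     return [seq[old_idxs[i]] if i in old_idxs else next(remaining_values) for i in range(len(seq))]
-- ===== SOURCE B (Python) =====
-- def move_elements_by_mapping(
--     seq,
--     new_idxs,
--     old_idxs=None,
-- ):
--     # build the explicit (target position, source index) pairing for every
--     # output slot, sort it by target position, then gather from seq
--     if old_idxs is None:
--         old_idxs = dict(zip(new_idxs.values(), new_idxs))
--     n = len(seq)
--     pairs = [(pos, old) for pos, old in old_idxs.items() if 0 <= pos < n]
--     free_pos = [i for i in range(n) if i not in old_idxs]
--     free_old = [i for i in range(n) if i not in new_idxs]
--     pairs += zip(free_pos, free_old)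
--     pairs.sort(key=lambda p: p[0])
--     return [seq[old] for _, old in pairs]
-- ===== Notes on version B (the rewrite author's own statement) =====
-- stated objective: alternative
-- what changed: A builds the output with one comprehension that looks every index up in the inverted mapping and pulls unmoved elements from a lazy generator; B instead constructs an explicit (target position, source index) pair list - the in-range mapping items plus free positions zipped with unmoved indices - sorts it by target position, and gathers from seq in one final pass.
import Mathlib
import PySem

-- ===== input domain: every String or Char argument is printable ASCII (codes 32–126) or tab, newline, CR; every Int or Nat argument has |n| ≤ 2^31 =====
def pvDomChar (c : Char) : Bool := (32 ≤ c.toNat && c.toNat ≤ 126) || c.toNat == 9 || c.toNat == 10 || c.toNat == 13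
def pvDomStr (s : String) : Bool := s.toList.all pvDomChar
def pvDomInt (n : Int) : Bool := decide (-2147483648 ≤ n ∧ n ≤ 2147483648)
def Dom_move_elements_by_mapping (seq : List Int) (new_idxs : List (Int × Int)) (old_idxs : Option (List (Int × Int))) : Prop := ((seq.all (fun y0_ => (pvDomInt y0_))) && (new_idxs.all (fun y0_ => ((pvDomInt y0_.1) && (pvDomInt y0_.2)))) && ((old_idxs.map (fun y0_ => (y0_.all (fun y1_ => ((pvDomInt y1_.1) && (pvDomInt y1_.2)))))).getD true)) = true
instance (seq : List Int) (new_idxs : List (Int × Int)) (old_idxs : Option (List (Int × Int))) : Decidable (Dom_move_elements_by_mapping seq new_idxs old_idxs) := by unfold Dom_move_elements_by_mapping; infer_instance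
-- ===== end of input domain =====

-- B replaces A's per-index lookup comprehension with its lazy generator by an explicit
-- (target position, source index) pair list, sorted by position and then gathered
-- (objective: alternative, same cost). Equal return values; neither mutates its input.

-- shared with both ports: the effective old_idxs dict (Python: `if old_idxs is None: old_idxs = dict(zip(new_idxs.values(), new_idxs))`)
def pvEffOld (new_idxs : List (Int × Int)) (old_idxs : Option (List (Int × Int))) : PySem.Dict Int Int :=
  match old_idxs with
  | some l => PySem.Dict.ofList l
  | none =>
    let newd := PySem.Dict.ofList new_idxs
    PySem.Dict.ofList (newd.values.zip newd.keys)

-- `seq[o]` (total form; Pre_ guarantees the index is in range wherever A returns)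
def pvSeqVal (seq : List Int) (o : Int) : Int := (PySem.List.pyGet? seq o).getD 0

-- ===== PORT A =====
-- A's generator `(e for i, e in enumerate(seq) if i not in new_idxs)`, materialised
def pvRemaining (seq : List Int) (new_idxs : List (Int × Int)) : List Int :=
  ((PySem.List.enumerate seq 0).filter (fun p => !((PySem.Dict.ofList new_idxs).contains p.1))).map (fun p => p.2)

-- A's comprehension: for each i in range(len(seq)), `seq[old_idxs[i]] if i in old_idxs else next(remaining_values)`
def pvGoA (seq : List Int) (old : PySem.Dict Int Int) : List Int → List Int → List Int
  | [], _ => []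
  | i :: is, rem =>
    if old.contains i then pvSeqVal seq (old.getD i 0) :: pvGoA seq old is rem
    else match rem with
      | [] => []  -- next() raised StopIteration: excluded by Pre_
      | e :: rest => e :: pvGoA seq old is rest

def move_elements_by_mapping (seq : List Int) (new_idxs : List (Int × Int)) (old_idxs : Option (List (Int × Int))) : List Int :=
  let old := pvEffOld new_idxs old_idxs
  pvGoA seq old (PySem.List.pyRange 0 seq.length 1) (pvRemaining seq new_idxs)

-- ===== PORT B =====
-- Source B: pairs = in-range old_idxs.items() ++ zip(free positions, free old indices); pairs.sort(key=fst); gather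
def move_elements_by_mapping_alt (seq : List Int) (new_idxs : List (Int × Int)) (old_idxs : Option (List (Int × Int))) : List Int :=
  let old := pvEffOld new_idxs old_idxs
  let n : Int := seq.length
  let pairs1 := old.items.filter (fun p => decide (0 ≤ p.1) && decide (p.1 < n))
  let freePos := (PySem.List.pyRange 0 n 1).filter (fun i => !(old.contains i))
  let freeOld := (PySem.List.pyRange 0 n 1).filter (fun i => !((PySem.Dict.ofList new_idxs).contains i))
  let pairs := PySem.List.sorted (pairs1 ++ freePos.zip freeOld) (fun p => p.1) false
  pairs.map (fun p => pvSeqVal seq p.2)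

-- ===== PRECONDITION & SPEC =====
-- Pre_ excludes exactly the inputs where the Python A raises: an IndexError from seq[old_idxs[i]]
-- for some used (in-range) key i, or a StopIteration when the free slots outnumber the unmoved elements.
def Pre_move_elements_by_mapping (seq : List Int) (new_idxs : List (Int × Int)) (old_idxs : Option (List (Int × Int))) : Prop :=
  (∀ p ∈ (pvEffOld new_idxs old_idxs).items, 0 ≤ p.1 → p.1 < (seq.length : Int) →
      PySem.Raise.InRange seq.length p.2) ∧
  (PySem.List.pyRange 0 seq.length 1).countP (fun i => !((pvEffOld new_idxs old_idxs).contains i)) ≤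
    (PySem.List.pyRange 0 seq.length 1).countP (fun i => !((PySem.Dict.ofList new_idxs).contains i))
instance (seq : List Int) (new_idxs : List (Int × Int)) (old_idxs : Option (List (Int × Int))) : Decidable (Pre_move_elements_by_mapping seq new_idxs old_idxs) := by unfold Pre_move_elements_by_mapping; infer_instance

def pvWitness_move_elements_by_mapping : List Int × (List (Int × Int)) × (Option (List (Int × Int))) :=
  ([10, 20, 30], [(0, 2)], none)

def Spec_move_elements_by_mapping (seq : List Int) (new_idxs : List (Int × Int)) (old_idxs : Option (List (Int × Int))) (out : List Int) : Prop := out = move_elements_by_mapping_alt seq new_idxs old_idxs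
instance (seq : List Int) (new_idxs : List (Int × Int)) (old_idxs : Option (List (Int × Int))) (out : List Int) : Decidable (Spec_move_elements_by_mapping seq new_idxs old_idxs out) := by unfold Spec_move_elements_by_mapping; infer_instance

-- ===== CLAIM (what is proved, stated in full; the proofs are below) =====
def Claim_equal_move_elements_by_mapping : Prop := ∀ (seq : List Int) (new_idxs : List (Int × Int)) (old_idxs : Option (List (Int × Int))), Dom_move_elements_by_mapping seq new_idxs old_idxs → Pre_move_elements_by_mapping seq new_idxs old_idxs → Spec_move_elements_by_mapping seq new_idxs old_idxs (move_elements_by_mapping seq new_idxs old_idxs)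

-- ===== LEMMAS AND PROOFS =====

-- the canonical (position, source index) pair list, generated in A's traversal order
def pvGoC (old : PySem.Dict Int Int) : List Int → List Int → List (Int × Int)
  | [], _ => []
  | i :: is, fo =>
    if old.contains i then (i, old.getD i 0) :: pvGoC old is fo
    else match fo with
      | [] => []
      | j :: rest => (i, j) :: pvGoC old is rest

-- A's loop IS the gather over the canonical pair list
lemma pvGoA_eq_map_pvGoC (seq : List Int) (old : PySem.Dict Int Int) :
    ∀ (idxs fo : List Int),
      pvGoA seq old idxs (fo.map (pvSeqVal seq)) = (pvGoC old idxs fo).map (fun p => pvSeqVal seq p.2) := by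
  intro idxs
  induction idxs with
  | nil => intro fo; rfl
  | cons i is ih =>
    intro fo
    simp only [pvGoA, pvGoC]
    split_ifs with hc
    · simp [ih fo]
    · cases fo with
      | nil => rfl
      | cons j rest => simp [ih rest]

-- A's remaining-values generator gathers exactly the free old indices
lemma pvRemaining_eq (seq : List Int) (new_idxs : List (Int × Int)) :
    pvRemaining seq new_idxs
      = (((PySem.List.pyRange 0 (seq.length : Int) 1).filter
          (fun i => !((PySem.Dict.ofList new_idxs).contains i))).map (pvSeqVal seq)) := by
  unfold pvRemaining
  rw [PySem.List.enumerate_eq_map_pyRange (d := 0), List.filter_map, List.map_map]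
  simp only [PySem.List.len_eq, Function.comp_def]
  rfl

-- the keys of the canonical pair list form a sublist of the traversed indices
lemma pvGoC_keys_sublist (old : PySem.Dict Int Int) :
    ∀ (idxs fo : List Int), ((pvGoC old idxs fo).map Prod.fst).Sublist idxs := by
  intro idxs
  induction idxs with
  | nil => intro fo; simp [pvGoC]
  | cons i is ih =>
    intro fo
    simp only [pvGoC]
    split_ifs with hc
    · simpa using (ih fo).cons₂ i
    · cases fo with
      | nil => simp
      | cons j rest => simpa using (ih rest).cons₂ i

-- the canonical list is a permutation of B's unsorted pair list (mapped part ++ zipped free part)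
lemma pvGoC_perm (old : PySem.Dict Int Int) :
    ∀ (idxs fo : List Int),
      idxs.countP (fun i => !(old.contains i)) ≤ fo.length →
      (pvGoC old idxs fo).Perm
        ((idxs.filter (fun i => old.contains i)).map (fun i => (i, old.getD i 0)) ++
          (idxs.filter (fun i => !(old.contains i))).zip fo) := by
  intro idxs
  induction idxs with
  | nil => intro fo _; simp [pvGoC]
  | cons i is ih =>
    intro fo hlen
    rw [List.countP_cons] at hlen
    by_cases hc : old.contains i = true
    · have hlen' : is.countP (fun i => !(old.contains i)) ≤ fo.length := by
        simp [hc] at hlen; omega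
      have h := (ih fo hlen').cons (i, old.getD i 0)
      simpa [pvGoC, hc, List.filter_cons] using h
    · have hc' : old.contains i = false := by simpa using hc
      cases fo with
      | nil => exfalso; simp [hc'] at hlen
      | cons j rest =>
        have hlen' : is.countP (fun i => !(old.contains i)) ≤ rest.length := by
          simp [hc'] at hlen; omega
        have h := ((ih rest hlen').cons (i, j)).trans (List.perm_middle).symm
        simpa [pvGoC, hc', List.filter_cons] using h

-- items' keys of the effective dict are nodup
lemma pvEffOld_keys_nodup (new_idxs : List (Int × Int)) (old_idxs : Option (List (Int × Int))) :
    ((pvEffOld new_idxs old_idxs).items.map Prod.fst).Nodup := by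
  have h : ∀ (l : List (Int × Int)), ((PySem.Dict.ofList l).items.map Prod.fst).Nodup := by
    intro l
    have := PySem.Dict.nodup_keys_ofList l
    simpa [PySem.Dict.keys] using this
  cases old_idxs with
  | some l => exact h l
  | none => exact h _

-- B's in-range items are a permutation of the mapped part of the canonical list
lemma pvItems_filter_perm (old : PySem.Dict Int Int) (n : Int)
    (hnod : (old.items.map Prod.fst).Nodup) :
    (old.items.filter (fun p => decide (0 ≤ p.1) && decide (p.1 < n))).Perm
      (((PySem.List.pyRange 0 n 1).filter (fun i => old.contains i)).map
        (fun i => (i, old.getD i 0))) := by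
  have hknod : old.keys.Nodup := by simpa [PySem.Dict.keys] using hnod
  apply (List.perm_ext_iff_of_nodup ?_ ?_).mpr
  · rintro ⟨k, v⟩
    simp only [List.mem_filter, List.mem_map, Bool.and_eq_true, decide_eq_true_eq]
    constructor
    · rintro ⟨hmem, h0, hn⟩
      have hget : old.get? k = some v := PySem.Dict.get?_of_mem_items old hmem hknod
      refine ⟨k, ⟨(PySem.List.mem_pyRange_one).mpr ⟨h0, hn⟩,
        by rw [PySem.Dict.contains_eq_isSome_get?, hget]; rfl⟩, ?_⟩
      rw [PySem.Dict.getD_of_get?_eq_some old 0 hget]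
    · rintro ⟨i, ⟨hir, hic⟩, heq⟩
      obtain ⟨h0, hn⟩ := (PySem.List.mem_pyRange_one).mp hir
      have hsome : (old.get? i).isSome := by
        rw [← PySem.Dict.contains_eq_isSome_get?]; exact hic
      obtain ⟨w, hw⟩ := Option.isSome_iff_exists.mp hsome
      have hmem : (i, w) ∈ old.items := PySem.Dict.mem_items_of_get?_eq_some old hw
      have hgd : old.getD i 0 = w := PySem.Dict.getD_of_get?_eq_some old 0 hw
      rw [hgd] at heq
      injection heq with h1 h2
      subst h1; subst h2
      exact ⟨hmem, h0, hn⟩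
  · exact (hnod.of_map _).filter _
  · apply List.Nodup.map
    · intro a b h
      simpa using congrArg Prod.fst h
    · exact (PySem.List.nodup_pyRange_one 0 n).filter _

-- ===== VERDICT (by name: the statement is the Claim_ definition above) =====
theorem move_elements_by_mapping_spec : Claim_equal_move_elements_by_mapping := by
  intro seq new_idxs old_idxs _ hpre
  unfold Spec_move_elements_by_mapping move_elements_by_mapping move_elements_by_mapping_alt
  obtain ⟨_, hcnt⟩ := hpre
  have hcnt' : (PySem.List.pyRange 0 (seq.length : Int) 1).countP
        (fun i => !((pvEffOld new_idxs old_idxs).contains i))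
      ≤ ((PySem.List.pyRange 0 (seq.length : Int) 1).filter
        (fun i => !((PySem.Dict.ofList new_idxs).contains i))).length := by
    rw [← List.countP_eq_length_filter]
    exact hcnt
  have hperm := (pvGoC_perm (pvEffOld new_idxs old_idxs) _ _ hcnt').trans
    (List.Perm.append_right _
      (pvItems_filter_perm (pvEffOld new_idxs old_idxs) (seq.length : Int)
        (pvEffOld_keys_nodup new_idxs old_idxs)).symm)
  have hpair : (pvGoC (pvEffOld new_idxs old_idxs) (PySem.List.pyRange 0 (seq.length : Int) 1)
      ((PySem.List.pyRange 0 (seq.length : Int) 1).filter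
        (fun i => !((PySem.Dict.ofList new_idxs).contains i)))).Pairwise (fun a b => a.1 < b.1) := by
    rw [← List.pairwise_map (f := Prod.fst)]
    exact ((PySem.List.pairwise_lt_pyRange_one 0 _).sublist (pvGoC_keys_sublist _ _ _))
  have hsorted := PySem.List.sorted_eq_of_perm_of_pairwise_lt _ _
    (fun p : Int × Int => p.1) hperm hpair
  show pvGoA seq (pvEffOld new_idxs old_idxs) (PySem.List.pyRange 0 (seq.length : Int) 1)
        (pvRemaining seq new_idxs)
      = (PySem.List.sorted
          (((pvEffOld new_idxs old_idxs).items.filter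
              (fun p => decide (0 ≤ p.1) && decide (p.1 < (seq.length : Int)))) ++
            (((PySem.List.pyRange 0 (seq.length : Int) 1).filter
                (fun i => !((pvEffOld new_idxs old_idxs).contains i))).zip
              ((PySem.List.pyRange 0 (seq.length : Int) 1).filter
                (fun i => !((PySem.Dict.ofList new_idxs).contains i)))))
          (fun p => p.1)).map (fun p => pvSeqVal seq p.2)
  rw [hsorted, ← pvGoA_eq_map_pvGoC seq, ← pvRemaining_eq seq new_idxs]
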